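-- pv_equiv track=rewrite | github.com/the9kim/python-algorithm-interview | Algorithm/kakao/t22/P1_3_Report_Result.py | solution
-- ===== SOURCE A (Python) =====
-- from collections import defaultdict
-- from typing import List
--
-- def solution(id_list: List[int], report: List[str], k: int) -> List[int]:
--     report_pairs = {tuple(r.split()) for r in report}
--
--     reported = defaultdict(set)
--
--     for reporter, reported_person in report_pairs:
--         reported[reported_person].add(reporter)
--
--     email_count = defaultdict(int)
--
--     for reported_person, reporters in reported.items():
--         if len(reporters) >= k:
--             for reporter in reporters:
--                 email_count[reporter] += 1
--
--     return [email_count[user] for user in id_list]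
-- ===== SOURCE B (Python) =====
-- def solution(id_list, report, k):
--     pairs = {tuple(r.split()) for r in report}
--
--     def over(person):
--         return sum(1 for q in pairs if q[1] == person) >= k
--
--     return [sum(1 for rep, per in pairs if rep == u and over(per)) for u in id_list]
-- ===== Notes on version B (the rewrite author's own statement) =====
-- stated objective: simpler
-- what changed: B removes all dictionaries and staged passes: after deduplicating the report pairs, each user's answer is computed directly as a count over the pairs, with an inner scan counting how often each reported person occurs, instead of A's hash-map grouping of reporter sets followed by a tallying loop.
import Mathlib
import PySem

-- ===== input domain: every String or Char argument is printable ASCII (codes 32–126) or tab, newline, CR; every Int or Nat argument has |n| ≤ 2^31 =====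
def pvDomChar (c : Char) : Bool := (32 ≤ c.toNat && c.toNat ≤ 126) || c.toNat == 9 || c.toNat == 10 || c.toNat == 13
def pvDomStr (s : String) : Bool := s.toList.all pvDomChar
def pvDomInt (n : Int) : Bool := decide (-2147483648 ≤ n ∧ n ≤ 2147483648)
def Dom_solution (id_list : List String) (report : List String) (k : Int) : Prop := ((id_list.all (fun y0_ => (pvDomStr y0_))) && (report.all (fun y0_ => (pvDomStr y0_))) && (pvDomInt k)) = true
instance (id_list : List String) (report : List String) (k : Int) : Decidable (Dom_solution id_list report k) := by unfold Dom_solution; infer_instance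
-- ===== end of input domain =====

-- B drops A's two hash maps (the dict of reporter-sets and the email-count dict) entirely:
-- after deduplication it computes each user's answer directly as a count over the pairs with
-- an inner scan counting reports per person (simpler decomposition, not faster).

-- ===== PORT A =====
-- tuple(r.split()); under Pre_ every split has exactly 2 tokens (otherwise Python's
-- pair-unpacking raises ValueError, excluded by Pre_), so the fallback is unreachable.
def pvParse (r : String) : String × String :=
  match PySem.Str.split₀ r with
  | [a, b] => (a, b)
  | _ => ("", "")

def solution (id_list : List String) (report : List String) (k : Int) : List Int :=
  let report_pairs : PySem.Set (String × String) := PySem.Set.ofList (report.map pvParse)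
  let reported : PySem.Dict String (PySem.Set String) :=
    report_pairs.foldl
      (fun d pr => d.insert pr.2 (PySem.Set.add (d.getD pr.2 PySem.Set.empty) pr.1))
      PySem.Dict.empty
  let email_count : PySem.Dict String Int :=
    reported.items.foldl
      (fun e it =>
        if k ≤ (PySem.Set.len it.2 : Int) then
          it.2.foldl (fun e rep => e.insert rep (e.getD rep 0 + 1)) e
        else e)
      PySem.Dict.empty
  id_list.map (fun u => email_count.getD u 0)

-- ===== PORT B =====
def solution_alt (id_list : List String) (report : List String) (k : Int) : List Int :=
  let pairs : PySem.Set (String × String) := PySem.Set.ofList (report.map pvParse)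
  let isOver : String → Bool := fun person =>
    decide (k ≤ (pairs.countP (fun q => q.2 == person) : Int))
  id_list.map (fun u => (pairs.countP (fun pr => pr.1 == u && isOver pr.2) : Int))

-- ===== PRECONDITION & SPEC =====
-- Pre_ excludes exactly the inputs where some report string does not split into two
-- whitespace-separated tokens: there Python A raises ValueError while unpacking the tuple.
def Pre_solution (id_list : List String) (report : List String) (k : Int) : Prop :=
  ∀ r ∈ report, (PySem.Str.split₀ r).length = 2

instance (id_list : List String) (report : List String) (k : Int) : Decidable (Pre_solution id_list report k) := by unfold Pre_solution; infer_instance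

def pvWitness_solution : List String × List String × Int :=
  (["muzi", "frodo", "apeach", "neo"], ["muzi frodo", "apeach frodo", "frodo neo", "muzi neo", "apeach muzi"], 2)

def Spec_solution (id_list : List String) (report : List String) (k : Int) (out : List Int) : Prop := out = solution_alt id_list report k
instance (id_list : List String) (report : List String) (k : Int) (out : List Int) : Decidable (Spec_solution id_list report k out) := by unfold Spec_solution; infer_instance

-- ===== CLAIM (what is proved, stated in full; the proofs are below) =====
def Claim_equal_solution : Prop := ∀ (id_list : List String) (report : List String) (k : Int), Dom_solution id_list report k → Pre_solution id_list report k → Spec_solution id_list report k (solution id_list report k)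

-- ===== LEMMAS AND PROOFS =====

-- A's grouping loop: the reporter-set collected for person p is exactly the first components
-- of the pairs whose second component is p, in order.
theorem pvGrpA (L : List (String × String)) (d : PySem.Dict String (PySem.Set String)) (p : String) :
    (L.foldl (fun d pr => d.insert pr.2 (PySem.Set.add (d.getD pr.2 PySem.Set.empty) pr.1)) d).getD p PySem.Set.empty
      = PySem.Set.update (d.getD p PySem.Set.empty) ((L.filter (fun q => q.2 == p)).map (·.1)) := by
  induction L generalizing d with
  | nil => simp [PySem.Set.update_nil]
  | cons a t ih =>
    simp only [List.foldl_cons, List.filter_cons]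
    by_cases h : a.2 = p
    · simp only [h, beq_self_eq_true, if_pos, List.map_cons, PySem.Set.update_cons, ih,
        PySem.Dict.getD_insert]
    · have hb : (a.2 == p) = false := by simp [h]
      simp only [hb, ih, PySem.Dict.getD_insert]
      rw [if_neg (fun hpe => h hpe.symm)]
      simp

-- A's emailing loop over the grouped items, as a sum of per-item contributions.
theorem pvOuterA (k : Int) (u : String) (P : List (String × PySem.Set String)) (e : PySem.Dict String Int) :
    (P.foldl (fun e it =>
        if k ≤ (PySem.Set.len it.2 : Int) then
          it.2.foldl (fun e rep => e.insert rep (e.getD rep 0 + 1)) e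
        else e) e).getD u 0
      = e.getD u 0 + (P.map (fun it => if k ≤ (PySem.Set.len it.2 : Int) then (it.2.count u : Int) else 0)).sum := by
  induction P generalizing e with
  | nil => simp
  | cons a t ih =>
    simp only [List.foldl_cons, List.map_cons, List.sum_cons]
    by_cases h : k ≤ (PySem.Set.len a.2 : Int)
    · rw [if_pos h, if_pos h, ih, PySem.Dict.getD_foldl_insert_add_one]; ring
    · rw [if_neg h, if_neg h, ih]; ring

-- For a duplicate-free pair list, counting pairs (u, p) with property c p equals counting
-- the distinct second components p with c p that u reported.
theorem pvBridge (L : List (String × String)) (hL : L.Nodup) (u : String) (c : String → Bool) :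
    L.countP (fun pr => pr.1 == u && c pr.2)
      = (PySem.Set.ofList (L.map (·.2))).countP (fun p => c p && decide ((u, p) ∈ L)) := by
  rw [List.countP_eq_length_filter, List.countP_eq_length_filter]
  have h1 : ((L.filter (fun pr => pr.1 == u && c pr.2)).map (·.2)).Nodup := by
    refine List.Nodup.map_on ?_ (hL.filter _)
    intro x hx y hy hxy
    have hx' := List.mem_filter.1 hx
    have hy' := List.mem_filter.1 hy
    simp only [Bool.and_eq_true, beq_iff_eq] at hx' hy'
    exact Prod.ext (hx'.2.1.trans hy'.2.1.symm) hxy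
  have h2 : ((PySem.Set.ofList (L.map (·.2))).filter (fun p => c p && decide ((u, p) ∈ L))).Nodup :=
    (PySem.Set.nodup_ofList _).filter _
  have hperm : ((L.filter (fun pr => pr.1 == u && c pr.2)).map (·.2)).Perm
      ((PySem.Set.ofList (L.map (·.2))).filter (fun p => c p && decide ((u, p) ∈ L))) := by
    rw [List.perm_ext_iff_of_nodup h1 h2]
    intro p
    simp only [List.mem_map, List.mem_filter, PySem.Set.mem_ofList, Bool.and_eq_true,
      beq_iff_eq, decide_eq_true_eq]
    constructor
    · rintro ⟨pr, ⟨hmem, hpu, hc⟩, hp2⟩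
      have : pr = (u, p) := Prod.ext hpu hp2
      subst this
      exact ⟨⟨(u, p), hmem, rfl⟩, hc, hmem⟩
    · rintro ⟨-, hc, hmem⟩
      exact ⟨(u, p), ⟨hmem, rfl, hc⟩, rfl⟩
  simpa using hperm.length_eq

-- membership in A's reporter list for p
theorem pvMemReps (L : List (String × String)) (u p : String) :
    u ∈ (L.filter (fun q => q.2 == p)).map (·.1) ↔ (u, p) ∈ L := by
  simp only [List.mem_map, List.mem_filter, beq_iff_eq]
  constructor
  · rintro ⟨q, ⟨hq, hq2⟩, hq1⟩
    have : q = (u, p) := Prod.ext hq1 hq2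
    exact this ▸ hq
  · intro h
    exact ⟨(u, p), ⟨h, rfl⟩, rfl⟩

theorem pvRepsNodup (L : List (String × String)) (hL : L.Nodup) (p : String) :
    ((L.filter (fun q => q.2 == p)).map (·.1)).Nodup := by
  refine List.Nodup.map_on ?_ (hL.filter _)
  intro x hx y hy hxy
  have hx2 : x.2 = p := by simpa using (List.mem_filter.1 hx).2
  have hy2 : y.2 = p := by simpa using (List.mem_filter.1 hy).2
  exact Prod.ext hxy (hx2.trans hy2.symm)

theorem pvMain (L : List (String × String)) (hL : L.Nodup) (k : Int) (u : String) :
    (((L.foldl (fun d pr => d.insert pr.2 (PySem.Set.add (d.getD pr.2 PySem.Set.empty) pr.1))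
        (PySem.Dict.empty : PySem.Dict String (PySem.Set String))).items.foldl
      (fun e it =>
        if k ≤ (PySem.Set.len it.2 : Int) then
          it.2.foldl (fun e rep => e.insert rep (e.getD rep 0 + 1)) e
        else e) (PySem.Dict.empty : PySem.Dict String Int)).getD u 0)
    = (L.countP (fun pr =>
        pr.1 == u && decide (k ≤ (L.countP (fun q => q.2 == pr.2) : Int))) : Int) := by
  set K := PySem.Set.ofList (L.map (·.2)) with hK
  have hKnd : K.Nodup := PySem.Set.nodup_ofList _
  set c : String → Bool := fun p => decide (k ≤ (L.countP (fun q => q.2 == p) : Int)) with hc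
  -- ===== A side =====
  set reported := L.foldl
      (fun d pr => d.insert pr.2 (PySem.Set.add (d.getD pr.2 PySem.Set.empty) pr.1))
      PySem.Dict.empty with hreported
  have hkeys : reported.keys = K := by
    rw [hreported, PySem.Dict.keys_foldl_insert_key L (fun pr : String × String => pr.2)
      (fun (d : PySem.Dict String (PySem.Set String)) (pr : String × String) =>
        PySem.Set.add (d.getD pr.2 PySem.Set.empty) pr.1) PySem.Dict.empty]
    simp [PySem.Dict.keys_empty, PySem.Set.update_nil_left, hK]
  have hgetD : ∀ p, reported.getD p PySem.Set.empty = (L.filter (fun q => q.2 == p)).map (·.1) := by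
    intro p
    rw [hreported, pvGrpA]
    rw [PySem.Dict.getD_empty, PySem.Set.update_empty,
      PySem.Set.ofList_eq_self_of_nodup _ (pvRepsNodup L hL p)]
  have hitems : reported.items = K.map (fun p => (p, reported.getD p PySem.Set.empty)) := by
    rw [PySem.Dict.items_eq_map_keys reported (hkeys ▸ hKnd) PySem.Set.empty, hkeys]
  rw [pvOuterA, hitems, PySem.Dict.getD_empty, List.map_map]
  have hmapA : (K.map ((fun it => if k ≤ (PySem.Set.len it.2 : Int) then ((it.2 : PySem.Set String).count u : Int) else 0)
        ∘ fun p => (p, reported.getD p PySem.Set.empty)))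
      = K.map (fun p => if (c p && decide ((u, p) ∈ L)) = true then (1 : Int) else 0) := by
    apply List.map_congr_left
    intro p _
    simp only [Function.comp_apply, hgetD p]
    have hlen : (PySem.Set.len ((L.filter (fun q => q.2 == p)).map (·.1)) : Int)
        = (L.countP (fun q => q.2 == p) : Int) := by
      simp [PySem.Set.len, List.countP_eq_length_filter]
    rw [hlen]
    by_cases hth : k ≤ (L.countP (fun q => q.2 == p) : Int)
    · rw [if_pos hth]
      by_cases hup : (u, p) ∈ L
      · have : ((L.filter (fun q => q.2 == p)).map (·.1)).count u = 1 :=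
          List.count_eq_one_of_mem (pvRepsNodup L hL p) ((pvMemReps L u p).2 hup)
        simp [hc, this, hth, hup]
      · have : ((L.filter (fun q => q.2 == p)).map (·.1)).count u = 0 :=
          List.count_eq_zero_of_not_mem (fun hm => hup ((pvMemReps L u p).1 hm))
        simp [hc, this, hth, hup]
    · rw [if_neg hth]
      simp [hc, hth]
  rw [hmapA, PySem.List.sum_map_ite_one_zero]
  -- ===== B side: the bridge identifies B's direct count with A's per-person indicator sum =====
  rw [pvBridge L hL u c, ← hK]; ring

-- ===== VERDICT (by name: the statement is the Claim_ definition above) =====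
theorem solution_spec : Claim_equal_solution := by
  intro id_list report k hdom hpre
  unfold Spec_solution
  dsimp only [solution, solution_alt]
  apply List.map_congr_left
  intro u _
  exact pvMain (PySem.Set.ofList (report.map pvParse)) (PySem.Set.nodup_ofList _) k u
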